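-- pv_equiv track=rewrite | github.com/tgyuuAn/Algorithm | Number_Partner_python.py | solution
-- ===== SOURCE A (Python) =====
-- from collections import Counter,defaultdict
--
-- def solution(X, Y):
--
--     temp = defaultdict(int)
--     tempX = Counter(X)
--     tempY = Counter(Y)
--
--
--     for x in tempX:
--         if x in tempY:
--             temp[x] = min(tempX[x],tempY[x])
--
--     if len(temp) == 0:
--         return "-1"
--
--     if len(temp) == 1 and ("0" in temp):
--         return "0"
--
--     answer = ''
--     for x in sorted(temp.keys(),reverse= True):
--         answer += str(x)*temp[x]
--
--     return answer
-- ===== SOURCE B (Python) =====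
-- def solution(X, Y):
--     xs = sorted(X)
--     ys = sorted(Y)
--     shared = []
--     i = j = 0
--     while i < len(xs) and j < len(ys):
--         if xs[i] == ys[j]:
--             shared.append(xs[i])
--             i += 1
--             j += 1
--         elif xs[i] < ys[j]:
--             i += 1
--         else:
--             j += 1
--     if not shared:
--         return "-1"
--     if all(c == '0' for c in shared):
--         return "0"
--     return ''.join(reversed(shared))
-- ===== Notes on version B (the rewrite author's own statement) =====
-- stated objective: alternative
-- what changed: B drops the two Counters, the defaultdict and the key-set intersection: it sorts both strings and runs a two-pointer merge that emits each shared character min(count_X,count_Y) times in ascending order, then reverses the list (empty -> '-1', all-zeros -> '0').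
import Mathlib
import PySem

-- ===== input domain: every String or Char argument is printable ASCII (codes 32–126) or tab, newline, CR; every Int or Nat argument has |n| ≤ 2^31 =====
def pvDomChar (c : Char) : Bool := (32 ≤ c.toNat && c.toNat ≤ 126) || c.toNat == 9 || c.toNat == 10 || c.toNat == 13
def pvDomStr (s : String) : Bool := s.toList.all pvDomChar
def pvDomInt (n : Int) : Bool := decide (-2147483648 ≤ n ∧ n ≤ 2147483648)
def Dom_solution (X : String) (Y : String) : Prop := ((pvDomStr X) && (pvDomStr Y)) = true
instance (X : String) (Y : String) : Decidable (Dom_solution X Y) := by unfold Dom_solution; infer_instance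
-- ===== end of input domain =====

-- B replaces the two Counters and key-set intersection by a two-pointer merge of the two
-- sorted character lists (objective: alternative decomposition, same asymptotic cost).

-- ===== PORT A =====
-- str(x)*temp[x] for the one-char string x ports to List.replicate n.toNat x:
-- Python's  str * int  yields "" for n ≤ 0, exactly Int.toNat's clamp; exact here.
def solution (X : String) (Y : String) : String :=
  let tempX := PySem.Dict.counter X.toList
  let tempY := PySem.Dict.counter Y.toList
  let temp := tempX.keys.foldl (fun d x =>
      if tempY.contains x then d.insert x (min (tempX.getD x 0) (tempY.getD x 0)) else d)
    PySem.Dict.empty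
  if temp.size = 0 then "-1"
  else if temp.size = 1 ∧ temp.contains '0' then "0"
  else (PySem.List.sorted temp.keys (fun x => x) true).foldl
        (fun acc x => acc ++ String.ofList (List.replicate (temp.getD x 0).toNat x)) ""

-- ===== PORT B =====
-- the two-pointer while loop of Source B, as recursion on the two (sorted) lists
def pvMerge : List Char → List Char → List Char
  | [], _ => []
  | _ :: _, [] => []
  | a :: as, b :: bs =>
    if a = b then a :: pvMerge as bs
    else if a < b then pvMerge as (b :: bs)
    else pvMerge (a :: as) bs
termination_by xs ys => xs.length + ys.length
decreasing_by all_goals (simp only [List.length_cons]; omega)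

def solution_alt (X : String) (Y : String) : String :=
  let xs := PySem.List.sorted X.toList (fun c => c) false
  let ys := PySem.List.sorted Y.toList (fun c => c) false
  let shared := pvMerge xs ys
  if shared = [] then "-1"
  else if shared.all (fun c => c == '0') then "0"
  else String.ofList shared.reverse

-- ===== PRECONDITION & SPEC =====
def Spec_solution (X : String) (Y : String) (out : String) : Prop := out = solution_alt X Y
instance (X : String) (Y : String) (out : String) : Decidable (Spec_solution X Y out) := by unfold Spec_solution; infer_instance

-- ===== CLAIM (what is proved, stated in full; the proofs are below) =====
def Claim_equal_solution : Prop := ∀ (X : String) (Y : String), Dom_solution X Y → Spec_solution X Y (solution X Y)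

-- ===== LEMMAS AND PROOFS =====

-- the shared keys in first-occurrence order, A's min-count table, and the canonical
-- ascending multiset of shared characters
def pvKeys (X Y : String) : List Char :=
  (PySem.Set.ofList X.toList).filter (fun c => Y.toList.contains c)

def pvM (X Y : String) (c : Char) : Nat := min (X.toList.count c) (Y.toList.count c)

def pvAscK (X Y : String) : List Char := PySem.List.sorted (pvKeys X Y) (fun c => c) false

def pvAsc (X Y : String) : List Char :=
  (pvAscK X Y).flatMap (fun c => List.replicate (pvM X Y c) c)

def pvTemp (X Y : String) : PySem.Dict Char Int :=
  (PySem.Dict.counter X.toList).keys.foldl (fun d x =>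
      if (PySem.Dict.counter Y.toList).contains x then
        d.insert x (min ((PySem.Dict.counter X.toList).getD x 0)
                        ((PySem.Dict.counter Y.toList).getD x 0))
      else d)
    PySem.Dict.empty

lemma pvMerge_mem : ∀ (xs ys : List Char) (c : Char), c ∈ pvMerge xs ys → c ∈ xs ∧ c ∈ ys := by
  intro xs ys
  induction xs, ys using pvMerge.induct with
  | case1 ys => intro c h; simp [pvMerge] at h
  | case2 a as => intro c h; simp [pvMerge] at h
  | case3 as b bs ih =>
    intro c h
    rw [pvMerge, if_pos rfl] at h
    rcases List.mem_cons.1 h with rfl | h'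
    · exact ⟨List.mem_cons_self, List.mem_cons_self⟩
    · rcases ih c h' with ⟨h1, h2⟩
      exact ⟨List.mem_cons_of_mem _ h1, List.mem_cons_of_mem _ h2⟩
  | case4 a as b bs hab hlt ih =>
    intro c h
    rw [pvMerge, if_neg hab, if_pos hlt] at h
    rcases ih c h with ⟨h1, h2⟩
    exact ⟨List.mem_cons_of_mem _ h1, h2⟩
  | case5 a as b bs hab hlt ih =>
    intro c h
    rw [pvMerge, if_neg hab, if_neg hlt] at h
    rcases ih c h with ⟨h1, h2⟩
    exact ⟨h1, List.mem_cons_of_mem _ h2⟩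

lemma pvMerge_sorted : ∀ (xs ys : List Char), List.Pairwise (· ≤ ·) xs →
    List.Pairwise (· ≤ ·) ys → List.Pairwise (· ≤ ·) (pvMerge xs ys) := by
  intro xs ys
  induction xs, ys using pvMerge.induct with
  | case1 ys => intro _ _; simp [pvMerge]
  | case2 a as => intro _ _; simp [pvMerge]
  | case3 as b bs ih =>
    intro hx hy
    rw [pvMerge, if_pos rfl]
    refine List.pairwise_cons.2 ⟨?_, ih (List.Pairwise.of_cons hx) (List.Pairwise.of_cons hy)⟩
    intro z hz
    exact (List.pairwise_cons.1 hx).1 z (pvMerge_mem as bs z hz).1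
  | case4 a as b bs hab hlt ih =>
    intro hx hy
    rw [pvMerge, if_neg hab, if_pos hlt]
    exact ih (List.Pairwise.of_cons hx) hy
  | case5 a as b bs hab hlt ih =>
    intro hx hy
    rw [pvMerge, if_neg hab, if_neg hlt]
    exact ih hx (List.Pairwise.of_cons hy)

lemma pvMerge_count : ∀ (xs ys : List Char), List.Pairwise (· ≤ ·) xs →
    List.Pairwise (· ≤ ·) ys → ∀ c, (pvMerge xs ys).count c = min (xs.count c) (ys.count c) := by
  intro xs ys
  induction xs, ys using pvMerge.induct with
  | case1 ys => intro _ _ c; simp [pvMerge]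
  | case2 a as => intro _ _ c; simp [pvMerge]
  | case3 as b bs ih =>
    intro hx hy c
    rw [pvMerge, if_pos rfl]
    simp only [List.count_cons, beq_iff_eq, ih (List.Pairwise.of_cons hx) (List.Pairwise.of_cons hy) c]
    split_ifs <;> omega
  | case4 a as b bs hab hlt ih =>
    intro hx hy c
    rw [pvMerge, if_neg hab, if_pos hlt]
    rw [ih (List.Pairwise.of_cons hx) hy c]
    by_cases hc : c = a
    · subst hc
      have hzero : List.count c (b :: bs) = 0 := by
        rw [List.count_eq_zero]
        intro hmem
        rcases List.mem_cons.1 hmem with rfl | hmem'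
        · exact absurd rfl (ne_of_lt hlt)
        · exact absurd ((List.pairwise_cons.1 hy).1 c hmem') (not_le.2 hlt)
      simp only [hzero, List.count_cons_self]
      omega
    · rw [List.count_cons_of_ne (fun h => hc h.symm)]
  | case5 a as b bs hab hlt ih =>
    intro hx hy c
    rw [pvMerge, if_neg hab, if_neg hlt]
    rw [ih hx (List.Pairwise.of_cons hy)]
    have hba : b < a := lt_of_le_of_ne (not_lt.1 hlt) (fun h => hab h.symm)
    by_cases hc : c = b
    · subst hc
      have hzero : List.count c (a :: as) = 0 := by
        rw [List.count_eq_zero]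
        intro hmem
        rcases List.mem_cons.1 hmem with rfl | hmem'
        · exact absurd rfl (ne_of_gt hba)
        · exact absurd ((List.pairwise_cons.1 hx).1 c hmem') (not_le.2 hba)
      simp only [hzero, List.count_cons_self]
      omega
    · rw [List.count_cons_of_ne (fun h => hc h.symm)]


lemma pvKeys_nodup (X Y : String) : (pvKeys X Y).Nodup :=
  List.Nodup.filter _ (PySem.Set.nodup_ofList _)

lemma pvKeys_mem (X Y : String) (c : Char) : c ∈ pvKeys X Y ↔ c ∈ X.toList ∧ c ∈ Y.toList := by
  simp [pvKeys, List.mem_filter, PySem.Set.mem_ofList]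

lemma pvAscK_lt (X Y : String) : (pvAscK X Y).Pairwise (· < ·) := by
  have hle : (pvAscK X Y).Pairwise (· ≤ ·) :=
    PySem.List.sorted_pairwise (pvKeys X Y) (fun c => c)
  have hnd : (pvAscK X Y).Nodup :=
    (PySem.List.sorted_perm (pvKeys X Y) (fun c => c) false).symm.nodup (pvKeys_nodup X Y)
  exact (hle.and hnd).imp (fun h => lt_of_le_of_ne h.1 h.2)

lemma pvAscK_mem (X Y : String) (c : Char) : c ∈ pvAscK X Y ↔ c ∈ pvKeys X Y :=
  PySem.List.mem_sorted (pvKeys X Y) (fun c => c) false c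

lemma pvM_pos (X Y : String) (c : Char) (h : c ∈ pvKeys X Y) : 0 < pvM X Y c := by
  rcases (pvKeys_mem X Y c).1 h with ⟨h1, h2⟩
  have c1 := List.count_pos_iff.2 h1
  have c2 := List.count_pos_iff.2 h2
  unfold pvM
  omega

lemma pvFlat_sorted (l : List Char) (m : Char → Nat) (hl : l.Pairwise (· < ·)) :
    (l.flatMap (fun c => List.replicate (m c) c)).Pairwise (· ≤ ·) := by
  induction l with
  | nil => simp
  | cons a t ih =>
    rw [List.flatMap_cons, List.pairwise_append]
    refine ⟨List.pairwise_replicate.2 (Or.inr le_rfl), ih (List.Pairwise.of_cons hl), ?_⟩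
    intro x hx y hy
    rcases List.eq_of_mem_replicate hx with rfl
    rcases List.mem_flatMap.1 hy with ⟨k, hk, hyk⟩
    have hky := List.eq_of_mem_replicate hyk
    subst hky
    exact le_of_lt ((List.pairwise_cons.1 hl).1 _ hk)

lemma pvFlat_count (l : List Char) (m : Char → Nat) (hl : l.Nodup) (c : Char) :
    (l.flatMap (fun c => List.replicate (m c) c)).count c = if c ∈ l then m c else 0 := by
  induction l with
  | nil => simp
  | cons a t ih =>
    rw [List.flatMap_cons, List.count_append, ih (List.Nodup.of_cons hl), List.count_replicate]
    rcases List.nodup_cons.1 hl with ⟨hna, _⟩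
    by_cases hc : c = a
    · subst hc
      simp [fun h => hna h]
    · simp [hc, Ne.symm hc]

lemma pvAsc_sorted (X Y : String) : (pvAsc X Y).Pairwise (· ≤ ·) :=
  pvFlat_sorted _ _ (pvAscK_lt X Y)

lemma pvAsc_count (X Y : String) (c : Char) : (pvAsc X Y).count c = pvM X Y c := by
  unfold pvAsc
  have hnd : (pvAscK X Y).Nodup :=
    (PySem.List.sorted_perm (pvKeys X Y) (fun c => c) false).symm.nodup (pvKeys_nodup X Y)
  rw [pvFlat_count (pvAscK X Y) _ hnd]
  by_cases h : c ∈ pvAscK X Y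
  · simp [h]
  · have hk : ¬ (c ∈ X.toList ∧ c ∈ Y.toList) := fun hc => h ((pvAscK_mem X Y c).2 ((pvKeys_mem X Y c).2 hc))
    have : pvM X Y c = 0 := by
      unfold pvM
      by_cases h1 : c ∈ X.toList
      · have h2 : c ∉ Y.toList := fun h2 => hk ⟨h1, h2⟩
        rw [List.count_eq_zero.2 h2]
        omega
      · rw [List.count_eq_zero.2 h1]
        omega
    simp [h, this]

lemma pvMerge_eq_asc (X Y : String) :
    pvMerge (PySem.List.sorted X.toList (fun c => c) false)
            (PySem.List.sorted Y.toList (fun c => c) false) = pvAsc X Y := by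
  have hx : (PySem.List.sorted X.toList (fun c => c) false).Pairwise (· ≤ ·) :=
    PySem.List.sorted_pairwise X.toList (fun c => c)
  have hy : (PySem.List.sorted Y.toList (fun c => c) false).Pairwise (· ≤ ·) :=
    PySem.List.sorted_pairwise Y.toList (fun c => c)
  have hcnt : ∀ c, (pvMerge (PySem.List.sorted X.toList (fun c => c) false)
      (PySem.List.sorted Y.toList (fun c => c) false)).count c = (pvAsc X Y).count c := by
    intro c
    rw [pvMerge_count _ _ hx hy c, pvAsc_count,
      (PySem.List.sorted_perm X.toList (fun c => c) false).count_eq c,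
      (PySem.List.sorted_perm Y.toList (fun c => c) false).count_eq c]
    rfl
  exact List.Perm.eq_of_pairwise (fun a b _ _ h1 h2 => le_antisymm h1 h2)
    (pvMerge_sorted _ _ hx hy) (pvAsc_sorted X Y) (List.perm_iff_count.2 hcnt)

lemma pvTemp_items (X Y : String) :
    (pvTemp X Y).items = (pvKeys X Y).map (fun c => (c, (pvM X Y c : Int))) := by
  unfold pvTemp
  rw [PySem.Dict.keys_counter]
  simp only [PySem.Dict.contains_counter, PySem.Dict.getD_counter]
  rw [← List.foldl_filter]
  rw [PySem.Dict.items_foldl_insert_fresh _ (fun a => a)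
      (fun a => min ((List.count a X.toList : Int)) ((List.count a Y.toList : Int)))
      PySem.Dict.empty (fun a _ => PySem.Dict.contains_empty a)
      (by simpa using List.Nodup.filter _ (PySem.Set.nodup_ofList X.toList))]
  show [] ++ _ = _
  rw [List.nil_append]
  apply List.map_congr_left
  intro a _
  simp [pvM, Nat.cast_min]

lemma pvTemp_keys (X Y : String) : (pvTemp X Y).keys = pvKeys X Y := by
  show (pvTemp X Y).items.map Prod.fst = _
  rw [pvTemp_items, List.map_map]
  exact (List.map_congr_left fun a _ => rfl).trans (List.map_id _)

lemma pvTemp_size (X Y : String) : (pvTemp X Y).size = (pvKeys X Y).length := by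
  show (pvTemp X Y).items.length = _
  rw [pvTemp_items, List.length_map]

lemma pvTemp_getD (X Y : String) (c : Char) (h : c ∈ pvKeys X Y) :
    (pvTemp X Y).getD c 0 = (pvM X Y c : Int) := by
  apply PySem.Dict.getD_of_mem_items
  · rw [pvTemp_items]
    exact List.mem_map.2 ⟨c, h, rfl⟩
  · rw [pvTemp_keys]
    exact pvKeys_nodup X Y

lemma pvFold_toList (l : List Char) (g : Char → List Char) (s : String) :
    (l.foldl (fun acc x => acc ++ String.ofList (g x)) s).toList = s.toList ++ l.flatMap g := by
  induction l generalizing s with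
  | nil => simp
  | cons a t ih => simp [List.foldl_cons, ih, List.flatMap_cons]

lemma pvAsc_nil_iff (X Y : String) : pvAsc X Y = [] ↔ pvKeys X Y = [] := by
  constructor
  · intro h
    by_contra hne
    rcases List.exists_mem_of_ne_nil _ hne with ⟨a, ha⟩
    have haA : a ∈ pvAsc X Y :=
      List.mem_flatMap.2 ⟨a, (pvAscK_mem X Y a).2 ha,
        List.mem_replicate.2 ⟨by have := pvM_pos X Y a ha; omega, rfl⟩⟩
    rw [h] at haA
    exact absurd haA (List.not_mem_nil)
  · intro h
    unfold pvAsc pvAscK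
    rw [h]
    rfl

lemma pvAsc_all_zero (X Y : String) (hne : pvKeys X Y ≠ []) :
    ((pvAsc X Y).all (fun c => c == '0')) = true ↔ pvKeys X Y = ['0'] := by
  constructor
  · intro h
    have hall : ∀ k ∈ pvKeys X Y, k = '0' := by
      intro k hk
      have hkA : k ∈ pvAsc X Y :=
        List.mem_flatMap.2 ⟨k, (pvAscK_mem X Y k).2 hk,
          List.mem_replicate.2 ⟨by have := pvM_pos X Y k hk; omega, rfl⟩⟩
      simpa using List.all_eq_true.1 h k hkA
    rcases hk : pvKeys X Y with _ | ⟨a, t⟩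
    · exact absurd hk hne
    · have ha : a = '0' := hall a (by rw [hk]; exact List.mem_cons_self)
      have ht : t = [] := by
        rcases ht : t with _ | ⟨b, u⟩
        · rfl
        · have hb : b = '0' := hall b (by rw [hk, ht]; exact List.mem_cons_of_mem _ List.mem_cons_self)
          have hnd := pvKeys_nodup X Y
          rw [hk, ht] at hnd
          rcases List.nodup_cons.1 hnd with ⟨hna, _⟩
          exact absurd (by rw [ha, hb]; exact List.mem_cons_self) hna
      rw [ha, ht]
  · intro h
    have hK : pvAscK X Y = ['0'] := by
      unfold pvAscK
      rw [h]
      exact PySem.List.sorted_eq_self_of_pairwise _ _ (List.pairwise_singleton _ _)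
    unfold pvAsc
    rw [hK]
    simp


-- ===== VERDICT (by name: the statement is the Claim_ definition above) =====
theorem solution_spec : Claim_equal_solution := by
  unfold Claim_equal_solution
  intro X Y _
  unfold Spec_solution
  have hsol : solution X Y =
      (if (pvTemp X Y).size = 0 then "-1"
       else if (pvTemp X Y).size = 1 ∧ (pvTemp X Y).contains '0' then "0"
       else (PySem.List.sorted (pvTemp X Y).keys (fun x => x) true).foldl
        (fun acc x => acc ++ String.ofList (List.replicate (((pvTemp X Y).getD x 0).toNat) x)) "") := rfl
  have halt0 : solution_alt X Y =
      (if pvMerge (PySem.List.sorted X.toList (fun c => c) false)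
             (PySem.List.sorted Y.toList (fun c => c) false) = [] then "-1"
       else if (pvMerge (PySem.List.sorted X.toList (fun c => c) false)
             (PySem.List.sorted Y.toList (fun c => c) false)).all (fun c => c == '0') then "0"
       else String.ofList (pvMerge (PySem.List.sorted X.toList (fun c => c) false)
             (PySem.List.sorted Y.toList (fun c => c) false)).reverse) := rfl
  rw [pvMerge_eq_asc X Y] at halt0
  rw [hsol, halt0, pvTemp_size]
  by_cases h0 : pvKeys X Y = []
  · rw [if_pos (by rw [h0]; rfl), if_pos ((pvAsc_nil_iff X Y).2 h0)]
  · have hlen : (pvKeys X Y).length ≠ 0 := fun h => h0 (List.length_eq_zero_iff.1 h)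
    rw [if_neg hlen, if_neg (fun h => h0 ((pvAsc_nil_iff X Y).1 h))]
    by_cases h1 : pvKeys X Y = ['0']
    · rw [if_pos ?hc1, if_pos ((pvAsc_all_zero X Y h0).2 h1)]
      case hc1 =>
        constructor
        · rw [h1]; rfl
        · rw [PySem.Dict.contains_eq_decide_mem_keys, pvTemp_keys, h1]
          simp
    · rw [if_neg ?hc2, if_neg (fun h => h1 ((pvAsc_all_zero X Y h0).1 h))]
      case hc2 =>
        rintro ⟨hl1, hmem⟩
        rw [PySem.Dict.contains_eq_decide_mem_keys, pvTemp_keys] at hmem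
        have hm : '0' ∈ pvKeys X Y := by simpa using hmem
        rcases hk : pvKeys X Y with _ | ⟨a, t⟩
        · exact h0 hk
        · rw [hk] at hl1
          have ht : t = [] := List.length_eq_zero_iff.1 (by simpa using hl1)
          rw [hk, ht] at hm
          rcases List.mem_singleton.1 hm with rfl
          exact h1 (by rw [hk, ht])
      -- the remaining goal: the two concatenations agree
      rw [← String.toList_inj, pvFold_toList]
      simp only [String.toList_ofList, String.toList_empty, List.nil_append]
      have hdesc : PySem.List.sorted (pvTemp X Y).keys (fun x => x) true = (pvAscK X Y).reverse := by
        rw [pvTemp_keys]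
        apply PySem.List.sorted_rev_eq_of_perm_of_pairwise_gt
        · exact ((pvAscK X Y).reverse_perm).trans (PySem.List.sorted_perm (pvKeys X Y) (fun c => c) false)
        · exact List.pairwise_reverse.2 (pvAscK_lt X Y)
      rw [hdesc]
      have hrev : (pvAsc X Y).reverse =
          (pvAscK X Y).reverse.flatMap (fun c => List.replicate (pvM X Y c) c) := by
        unfold pvAsc
        rw [List.reverse_flatMap]
        apply List.flatMap_congr
        intro x _
        simp [List.reverse_replicate]
      rw [hrev]
      apply List.flatMap_congr
      intro c hc
      have hck : c ∈ pvKeys X Y := (pvAscK_mem X Y c).1 (List.mem_reverse.1 hc)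
      rw [pvTemp_getD X Y c hck, Int.toNat_natCast]
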